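-- pv_equiv track=rewrite | github.com/anhvt2/leetcode | linked-lists/3612-process-string-with-special-operations-i.py | processStr
-- ===== SOURCE A (Python) =====
-- def processStr(s: str) -> str:
--     res = ''
--     for i, char in enumerate(s):
--         if char == '*':
--             if res:
--                 res = res[:-1]
--         elif char == '#':
--             res += res
--         elif char == '%':
--             res = res[::-1]
--         else:
--             res += char
--     return res
-- ===== SOURCE B (Python) =====
-- def processStr(s: str) -> str:
--     # Two stacks: the current string is left[::-1] + right; reversing swaps the stacks.
--     left, right = [], []
--     for char in s:
--         if char == '*':
--             if right:
--                 right.pop()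
--             elif left:
--                 del left[0]
--         elif char == '#':
--             right = right + left[::-1] + right
--         elif char == '%':
--             left, right = right, left
--         else:
--             right.append(char)
--     return ''.join(left[::-1] + right)
-- ===== Notes on version B (the rewrite author's own statement) =====
-- stated objective: alternative
-- what changed: B replaces A's single growing string (whole-string copy on reverse, slice copy on delete) by a two-stack representation (current string = left reversed plus right) where the reverse op is a stack swap and deletes pop a list, materializing the string once at the end; intended as faster but measured only ~1.2-1.4x on random inputs.
import Mathlib
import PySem

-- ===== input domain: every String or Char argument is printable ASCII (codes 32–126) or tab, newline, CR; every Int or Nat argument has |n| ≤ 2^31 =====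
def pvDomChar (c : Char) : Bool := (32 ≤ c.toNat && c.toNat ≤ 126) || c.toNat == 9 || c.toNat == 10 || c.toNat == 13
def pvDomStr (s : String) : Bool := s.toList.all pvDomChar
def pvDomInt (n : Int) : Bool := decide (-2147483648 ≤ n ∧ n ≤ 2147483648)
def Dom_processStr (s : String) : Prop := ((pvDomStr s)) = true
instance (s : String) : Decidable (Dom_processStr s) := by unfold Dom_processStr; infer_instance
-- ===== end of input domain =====

-- B keeps the string as two stacks (left.reverse ++ right) so the reverse op is a stack swap; alternative structure, return value only.

-- ===== PORT A =====
-- res is the accumulated string as a list of chars; each char updates it exactly as A does.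
def processStrStep (res : List Char) (c : Char) : List Char :=
  if c = '*' then (if res ≠ [] then res.dropLast else res)
  else if c = '#' then res ++ res
  else if c = '%' then res.reverse
  else res ++ [c]

def processStr (s : String) : String :=
  String.ofList (s.toList.foldl processStrStep [])

-- ===== PORT B =====
-- state (left, right): current string = left.reverse ++ right; '%' swaps the stacks.
def processStrAltStep (st : List Char × List Char) (c : Char) : List Char × List Char :=
  let (left, right) := st
  if c = '*' then
    (match right with
     | _ :: _ => (left, right.dropLast)
     | [] => (left.drop 1, []))
  else if c = '#' then (left, right ++ left.reverse ++ right)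
  else if c = '%' then (right, left)
  else (left, right ++ [c])

def processStr_alt (s : String) : String :=
  let st := s.toList.foldl processStrAltStep ([], [])
  String.ofList (st.1.reverse ++ st.2)

-- ===== PRECONDITION & SPEC =====
def Spec_processStr (s : String) (out : String) : Prop := out = processStr_alt s
instance (s : String) (out : String) : Decidable (Spec_processStr s out) := by unfold Spec_processStr; infer_instance

-- ===== CLAIM (what is proved, stated in full; the proofs are below) =====
def Claim_equal_processStr : Prop := ∀ (s : String), Dom_processStr s → Spec_processStr s (processStr s)

-- ===== LEMMAS AND PROOFS =====

theorem step_agree (res : List Char) (left right : List Char)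
    (h : res = left.reverse ++ right) (c : Char) :
    processStrStep res c =
      (processStrAltStep (left, right) c).1.reverse ++ (processStrAltStep (left, right) c).2 := by
  subst h
  unfold processStrStep processStrAltStep
  by_cases h1 : c = '*'
  · simp only [h1]
    cases right with
    | nil =>
        simp only [List.append_nil]
        cases left with
        | nil => simp
        | cons a l => simp [List.dropLast_append_of_ne_nil]
    | cons a r =>
        have hne : (left.reverse ++ a :: r) ≠ [] := by simp
        simp [hne, List.dropLast_append_of_ne_nil]
  · by_cases h2 : c = '#'
    · simp [h2]
    · by_cases h3 : c = '%'
      · simp [h3]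
      · simp [h1, h2, h3]

theorem fold_agree (cs : List Char) (res left right : List Char)
    (h : res = left.reverse ++ right) :
    cs.foldl processStrStep res =
      (cs.foldl processStrAltStep (left, right)).1.reverse ++
      (cs.foldl processStrAltStep (left, right)).2 := by
  induction cs generalizing res left right with
  | nil => simpa using h
  | cons c cs ih =>
      simp only [List.foldl_cons]
      exact ih _ _ _ (step_agree res left right h c)

-- ===== VERDICT (by name: the statement is the Claim_ definition above) =====
theorem processStr_spec : Claim_equal_processStr := by
  intro s _
  unfold Spec_processStr processStr processStr_alt
  have := fold_agree s.toList [] [] [] rfl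
  simp only [this]
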